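-- pv_equiv track=rewrite | github.com/josh-keller/advent-of-code | 2016/day02/solution.py | part1
-- ===== SOURCE A (Python) =====
-- def next_num(num, d):
--     if d == 'U':
--         if num <= 3:
--             return num
--         return num - 3
--     if d == 'D':
--         if num >= 7:
--             return num
--         return num + 3
--     if d == 'L':
--         if num % 3 == 1:
--             return num
--         return num - 1
--     if d == 'R':
--         if num % 3 == 0:
--             return num
--         return num + 1
--
-- def part1(input):
--     num = 5
--     pin = []
--
--     for line in input.split('\n'):
--         for d in list(line):
--             num = next_num(num, d)
--         pin.append(num)
--
--     return ''.join([str(n) for n in pin])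
-- ===== SOURCE B (Python) =====
-- def part1(input):
--     # Precomputed transition table: for every key on the keypad grid and every
--     # direction, the neighbouring key (clamped at the edges).  The walk is then
--     # pure table lookup; dict.get leaves the key as None on unknown directions.
--     keypad = ["123", "456", "789"]
--     moves = {}
--     for r in range(3):
--         for c in range(3):
--             moves[(keypad[r][c], 'U')] = keypad[max(r - 1, 0)][c]
--             moves[(keypad[r][c], 'D')] = keypad[min(r + 1, 2)][c]
--             moves[(keypad[r][c], 'L')] = keypad[r][max(c - 1, 0)]
--             moves[(keypad[r][c], 'R')] = keypad[r][min(c + 1, 2)]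
--     key = '5'
--     pin = []
--     for line in input.split('\n'):
--         for d in line:
--             key = moves.get((key, d))
--         pin.append(str(key))
--     return ''.join(pin)
-- ===== Notes on version B (the rewrite author's own statement) =====
-- stated objective: alternative
-- what changed: B precomputes a transition table over the literal keypad grid (clamped row/col neighbours, built once) and walks it by pure dict lookup with the key character as state, replacing A's per-character arithmetic edge tests (num<=3, num%3) on an integer digit state; Pre_ excludes exactly the inputs on which A raises TypeError (a U/D/L/R move after a character outside U/D/L/R/newline).
import Mathlib
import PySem

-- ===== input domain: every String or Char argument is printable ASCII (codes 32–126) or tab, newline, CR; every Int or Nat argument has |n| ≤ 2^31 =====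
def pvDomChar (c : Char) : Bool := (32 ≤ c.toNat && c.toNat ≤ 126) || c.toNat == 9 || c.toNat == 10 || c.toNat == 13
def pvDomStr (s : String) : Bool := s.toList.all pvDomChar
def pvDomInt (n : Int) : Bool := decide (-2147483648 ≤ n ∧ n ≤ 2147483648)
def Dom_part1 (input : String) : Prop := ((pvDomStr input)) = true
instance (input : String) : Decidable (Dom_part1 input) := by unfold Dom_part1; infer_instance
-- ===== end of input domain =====

set_option maxRecDepth 4000


-- B walks a precomputed keypad transition table (key character as state) instead of A's
-- arithmetic edge tests on an integer digit state; same cost, different data structure.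

-- ===== PORT A =====
-- str(n), with str(None) = "None" (num can be None after an unrecognized character)
def renderA (n : Option Int) : String :=
  match n with | some m => PySem.Int.toStr m | none => "None"

-- next_num: Python returns None when d is none of U/D/L/R (the fall-through), hence Option Int.
def next_num (num : Int) (d : Char) : Option Int :=
  if d = 'U' then (if num ≤ 3 then some num else some (num - 3))
  else if d = 'D' then (if num ≥ 7 then some num else some (num + 3))
  else if d = 'L' then (if PySem.Int.mod num 3 = 1 then some num else some (num - 1))
  else if d = 'R' then (if PySem.Int.mod num 3 = 0 then some num else some (num + 1))
  else none

-- once num is None, Python raises TypeError at the next U/D/L/R comparison (excluded by Pre_)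
-- and returns None again on any other character; both are modelled as none here.
def stepA (num : Option Int) (d : Char) : Option Int :=
  match num with
  | some n => next_num n d
  | none => none

def part1 (input : String) : String :=
  let st := (PySem.Chars.splitOn input.toList ['\n']).foldl
    (fun (acc : List (Option Int) × Option Int) line =>
      let num := line.foldl stepA acc.2
      (acc.1 ++ [num], num)) ([], some 5)
  PySem.Str.join "" (st.1.map renderA)

-- ===== PORT B =====
def keypadB : List (List Char) := [['1', '2', '3'], ['4', '5', '6'], ['7', '8', '9']]

-- keypad[r][c]; every index used below is in range, so the defaults are never taken
def kpAt (r c : Int) : Char :=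
  (PySem.List.pyGet? ((PySem.List.pyGet? keypadB r).getD []) c).getD ' '

-- the table-building double loop of Source B
def movesB : PySem.Dict (Char × Char) Char :=
  (PySem.List.pyRange 0 3 1).foldl (fun d0 r =>
    (PySem.List.pyRange 0 3 1).foldl (fun d1 c =>
      let d1 := d1.insert (kpAt r c, 'U') (kpAt (max (r - 1) 0) c)
      let d1 := d1.insert (kpAt r c, 'D') (kpAt (min (r + 1) 2) c)
      let d1 := d1.insert (kpAt r c, 'L') (kpAt r (max (c - 1) 0))
      d1.insert (kpAt r c, 'R') (kpAt r (min (c + 1) 2))) d0)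
    PySem.Dict.empty

-- key = moves.get((key, d)); once key is None the pair (None, d) is never a table key,
-- so Python's get keeps returning None — the none branch.
def stepB (key : Option Char) (d : Char) : Option Char :=
  match key with
  | some k => movesB.get? (k, d)
  | none => none

-- str(key), with str(None) = "None"
def strOfKey (key : Option Char) : String :=
  match key with | some k => String.ofList [k] | none => "None"

def part1_alt (input : String) : String :=
  let st := (PySem.Chars.splitOn input.toList ['\n']).foldl
    (fun (acc : List String × Option Char) line =>
      let key := line.foldl stepB acc.2
      (acc.1 ++ [strOfKey key], key)) ([], some '5')
  PySem.Str.join "" st.1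

-- ===== PRECONDITION & SPEC =====
-- Pre_ excludes exactly the inputs on which A raises TypeError: those where a U/D/L/R
-- character occurs after the first character outside U/D/L/R/newline (A's num is None by
-- then and next_num compares None with an int); A returns normally on every other input.
def Pre_part1 (input : String) : Prop :=
  ((input.toList.dropWhile
      (fun c => c == 'U' || c == 'D' || c == 'L' || c == 'R' || c == '\n')).all
    (fun c => !(c == 'U' || c == 'D' || c == 'L' || c == 'R'))) = true
instance (input : String) : Decidable (Pre_part1 input) := by unfold Pre_part1; infer_instance

def pvWitness_part1 : String := "ULL\nRRDDD\nLURDL\nUUUUD"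

def Spec_part1 (input : String) (out : String) : Prop := out = part1_alt input
instance (input : String) (out : String) : Decidable (Spec_part1 input out) := by unfold Spec_part1; infer_instance

-- ===== CLAIM (what is proved, stated in full; the proofs are below) =====
def Claim_equal_part1 : Prop := ∀ (input : String), Dom_part1 input → Pre_part1 input → Spec_part1 input (part1 input)

-- ===== LEMMAS AND PROOFS =====

-- the digit character of n (proof-only)
def digitChar (n : Int) : Char := Char.ofNat (48 + n.toNat)

-- the simulation relation between A's state (a digit or None) and B's (a key char or None)
def stInv (a : Option Int) (b : Option Char) : Bool :=
  match a, b with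
  | none, none => true
  | some n, some ch => decide (1 ≤ n) && decide (n ≤ 9) && (ch == digitChar n)
  | _, _ => false

lemma dict_get?_none_of_keys {κ ν : Type} [BEq κ] (dct : PySem.Dict κ ν) (k : κ)
    (h : ∀ kv ∈ dct.items, (kv.1 == k) = false) : dct.get? k = none := by
  obtain ⟨l⟩ := dct
  induction l with
  | nil => rfl
  | cons kv rest ih =>
    rw [PySem.Dict.get?_mk_cons, if_neg]
    · exact ih (fun kv' h' => h kv' (List.mem_cons_of_mem _ h'))
    · simp [h kv (List.mem_cons_self)]

lemma movesB_keys_dir : ∀ kv ∈ movesB.items,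
    kv.1.2 = 'U' ∨ kv.1.2 = 'D' ∨ kv.1.2 = 'L' ∨ kv.1.2 = 'R' := by decide

lemma movesB_get?_none (ch d : Char) (hU : d ≠ 'U') (hD : d ≠ 'D') (hL : d ≠ 'L')
    (hR : d ≠ 'R') : movesB.get? (ch, d) = none := by
  apply dict_get?_none_of_keys
  intro kv hkv
  have h2 := movesB_keys_dir kv hkv
  rw [beq_eq_false_iff_ne]
  intro heq
  have : kv.1.2 = d := by rw [heq]
  rcases h2 with h | h | h | h <;> rw [h] at this <;>
    [exact hU this.symm; exact hD this.symm; exact hL this.symm; exact hR this.symm]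

lemma step_inv (a : Option Int) (b : Option Char) (h : stInv a b = true) (d : Char) :
    stInv (stepA a d) (stepB b d) = true := by
  match a, b with
  | none, none => rfl
  | some n, some ch =>
    simp only [stInv, Bool.and_eq_true, beq_iff_eq, decide_eq_true_eq] at h
    obtain ⟨⟨h1, h2⟩, hch⟩ := h
    subst hch
    by_cases hU : d = 'U'
    · subst hU; interval_cases n <;> decide
    · by_cases hD : d = 'D'
      · subst hD; interval_cases n <;> decide
      · by_cases hL : d = 'L'
        · subst hL; interval_cases n <;> decide
        · by_cases hR : d = 'R'
          · subst hR; interval_cases n <;> decide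
          · have hA : stepA (some n) d = none := by
              simp [stepA, next_num, hU, hD, hL, hR]
            have hB : stepB (some (digitChar n)) d = none := by
              simp [stepB, movesB_get?_none _ d hU hD hL hR]
            rw [hA, hB]; rfl

lemma line_inv (cs : List Char) : ∀ (a : Option Int) (b : Option Char), stInv a b = true →
    stInv (cs.foldl stepA a) (cs.foldl stepB b) = true := by
  induction cs with
  | nil => intro a b h; exact h
  | cons d cs ih => intro a b h; exact ih _ _ (step_inv a b h d)

lemma render_inv (a : Option Int) (b : Option Char) (h : stInv a b = true) :
    renderA a = strOfKey b := by
  match a, b with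
  | none, none => rfl
  | some n, some ch =>
    simp only [stInv, Bool.and_eq_true, beq_iff_eq, decide_eq_true_eq] at h
    obtain ⟨⟨h1, h2⟩, hch⟩ := h
    subst hch
    interval_cases n <;> decide

-- the fold over the lines
lemma lines_inv (ls : List (List Char)) : ∀ (pa : List (Option Int)) (pb : List String)
    (a : Option Int) (b : Option Char), stInv a b = true → pa.map renderA = pb →
    (ls.foldl (fun (acc : List (Option Int) × Option Int) line =>
        let num := line.foldl stepA acc.2
        (acc.1 ++ [num], num)) (pa, a)).1.map renderA
      = (ls.foldl (fun (acc : List String × Option Char) line =>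
          let key := line.foldl stepB acc.2
          (acc.1 ++ [strOfKey key], key)) (pb, b)).1 := by
  induction ls with
  | nil => intro pa pb a b _ hmap; simpa using hmap
  | cons l ls ih =>
    intro pa pb a b hinv hmap
    have hinv' := line_inv l a b hinv
    simp only [List.foldl_cons]
    exact ih (pa ++ [l.foldl stepA a]) (pb ++ [strOfKey (l.foldl stepB b)]) _ _ hinv'
      (by simp [hmap, render_inv _ _ hinv'])

-- ===== VERDICT (by name: the statement is the Claim_ definition above) =====
theorem part1_spec : Claim_equal_part1 := by
  intro input _ _
  unfold Spec_part1 part1 part1_alt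
  have h := lines_inv (PySem.Chars.splitOn input.toList ['\n']) [] [] (some 5) (some '5')
    (by decide) rfl
  exact congrArg (PySem.Str.join "") h
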